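-- pv_equiv track=rewrite | github.com/blm34/AoC | 19.py | step_count
-- ===== SOURCE A (Python) =====
-- def step_count(molecule):
--     j = -1
--     count = -1
--     while j+1 < len(molecule):
--         # find start of next element
--         i = j = j+1
--         # Find end of element
--         while j+1 < len(molecule) and molecule[j+1] == molecule[j+1].lower():
--             j += 1
--         element = molecule[i:j+1]
--         if element == 'Rn':
--             pass
--         elif element == 'Ar':
--             pass
--         elif element == 'Y':
--             count -= 1
--         else:
--             count += 1
--     return count
-- ===== SOURCE B (Python) =====
-- def step_count(molecule):
--     # Build the element list in one per-character pass, then count arithmetically.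
--     elements = []
--     for c in molecule:
--         if elements and c == c.lower():
--             elements[-1] += c
--         else:
--             elements.append(c)
--     return (len(elements) - elements.count('Rn') - elements.count('Ar')
--             - 2 * elements.count('Y') - 1)
-- ===== Notes on version B (the rewrite author's own statement) =====
-- stated objective: simpler
-- what changed: B tokenizes the molecule into an element list with a per-character fold and then computes the answer arithmetically from element counts (len - #Rn - #Ar - 2*#Y - 1), replacing A's index-juggling nested while loops with an inline branchy accumulator.
import Mathlib
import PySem

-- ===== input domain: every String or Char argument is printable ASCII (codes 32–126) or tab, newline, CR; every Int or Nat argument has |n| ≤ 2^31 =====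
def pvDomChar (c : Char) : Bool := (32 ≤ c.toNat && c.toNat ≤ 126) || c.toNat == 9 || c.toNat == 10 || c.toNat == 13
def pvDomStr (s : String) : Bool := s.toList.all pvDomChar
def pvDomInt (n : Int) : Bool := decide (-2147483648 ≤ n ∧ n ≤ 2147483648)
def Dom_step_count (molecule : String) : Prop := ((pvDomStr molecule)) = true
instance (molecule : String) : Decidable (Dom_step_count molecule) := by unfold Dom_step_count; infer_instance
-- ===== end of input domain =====

-- B builds the element list in one per-character pass and derives the count arithmetically
-- (len - #Rn - #Ar - 2*#Y - 1) instead of A's nested index loops with an inline accumulator.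

-- ===== PORT A =====
-- Python's `s[k] == s[k].lower()` on a one-character string: exact at the char level
-- (PySem.Chars.lowerChar is Python's single-codepoint lower).
def pvCont (c : Char) : Bool := PySem.Chars.lowerChar c == c

-- inner `while j+1 < len and molecule[j+1] == molecule[j+1].lower(): j += 1`
def pvFindEnd (l : List Char) (j : Nat) : Nat :=
  if h : j + 1 < l.length then
    if pvCont l[j + 1] then pvFindEnd l (j + 1) else j
  else j
termination_by l.length - j
decreasing_by omega

theorem le_pvFindEnd (l : List Char) (j : Nat) : j ≤ pvFindEnd l j := by
  unfold pvFindEnd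
  split
  · split
    · exact Nat.le_trans (Nat.le_succ j) (le_pvFindEnd l (j + 1))
    · exact Nat.le_refl j
  · exact Nat.le_refl j
termination_by l.length - j
decreasing_by omega

-- outer while loop of A; `s` is A's `j+1` (the start of the next element)
def pvOuterA (l : List Char) (s : Nat) (count : Int) : Int :=
  if h : s < l.length then
    let e := pvFindEnd l s
    let element := PySem.List.slice l (some (s : Int)) (some ((e : Int) + 1))
    let count' :=
      if element = "Rn".toList then count
      else if element = "Ar".toList then count
      else if element = "Y".toList then count - 1
      else count + 1
    pvOuterA l (e + 1) count'
  else count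
termination_by l.length - s
decreasing_by have := le_pvFindEnd l s; omega

def step_count (molecule : String) : Int := pvOuterA molecule.toList 0 (-1)

-- ===== PORT B =====
-- `if elements and c == c.lower(): elements[-1] += c else: elements.append(c)`
def pvPush (ts : List (List Char)) (c : Char) : List (List Char) :=
  if ts ≠ [] ∧ pvCont c then ts.dropLast ++ [ts.getLastD [] ++ [c]] else ts ++ [[c]]

def step_count_alt (molecule : String) : Int :=
  let elements := molecule.toList.foldl pvPush []
  (elements.length : Int) - elements.count "Rn".toList - elements.count "Ar".toList
    - 2 * elements.count "Y".toList - 1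

-- ===== PRECONDITION & SPEC =====
def Spec_step_count (molecule : String) (out : Int) : Prop := out = step_count_alt molecule
instance (molecule : String) (out : Int) : Decidable (Spec_step_count molecule out) := by unfold Spec_step_count; infer_instance

-- ===== CLAIM (what is proved, stated in full; the proofs are below) =====
def Claim_equal_step_count : Prop := ∀ (molecule : String), Dom_step_count molecule → Spec_step_count molecule (step_count molecule)

-- ===== LEMMAS AND PROOFS =====

-- the token list both programs implicitly build
def pvTok : List Char → List (List Char)
  | [] => []
  | c :: cs => (c :: cs.takeWhile pvCont) :: pvTok (cs.dropWhile pvCont)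
termination_by l => l.length
decreasing_by
  simp only [List.length_cons]
  exact Nat.lt_succ_of_le (List.length_dropWhile_le _ _)

def pvDelta (t : List Char) : Int :=
  if t = "Rn".toList then 0
  else if t = "Ar".toList then 0
  else if t = "Y".toList then -1
  else 1

theorem take_takeWhile (p : Char → Bool) (l : List Char) :
    l.take (l.takeWhile p).length = l.takeWhile p := by
  induction l with
  | nil => rfl
  | cons c cs ih => by_cases h : p c <;> simp [h, ih]

theorem drop_takeWhile (p : Char → Bool) (l : List Char) :
    l.drop (l.takeWhile p).length = l.dropWhile p := by
  induction l with
  | nil => rfl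
  | cons c cs ih => by_cases h : p c <;> simp [h, ih]

theorem pvFindEnd_eq (l : List Char) (j : Nat) :
    pvFindEnd l j = j + ((l.drop (j + 1)).takeWhile pvCont).length := by
  unfold pvFindEnd
  split
  case isTrue hlen =>
    have hd : l.drop (j + 1) = l[j + 1] :: l.drop (j + 1 + 1) := List.drop_eq_getElem_cons hlen
    by_cases hc : pvCont l[j + 1]
    · rw [if_pos hc, pvFindEnd_eq l (j + 1), hd, List.takeWhile_cons, if_pos hc]
      simp; omega
    · rw [if_neg hc, hd, List.takeWhile_cons, if_neg hc]
      simp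
  case isFalse hlen =>
    rw [List.drop_eq_nil_of_le (by omega)]
    simp
termination_by l.length - j
decreasing_by omega

theorem pvOuterA_eq (l : List Char) (s : Nat) (count : Int) :
    pvOuterA l s count = count + ((pvTok (l.drop s)).map pvDelta).sum := by
  unfold pvOuterA
  split
  case isTrue h =>
    have he := pvFindEnd_eq l s
    set r := ((l.drop (s + 1)).takeWhile pvCont).length with hr
    have hd : l.drop s = l[s] :: l.drop (s + 1) := List.drop_eq_getElem_cons h
    have hslice : PySem.List.slice l (some (s : Int)) (some ((pvFindEnd l s : Int) + 1))
        = l[s] :: (l.drop (s + 1)).takeWhile pvCont := by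
      rw [he]
      rw [show ((s + r : Nat) : Int) + 1 = ((s + r + 1 : Nat) : Int) by push_cast; ring]
      rw [PySem.List.slice_natCast]
      rw [hd, show s + r + 1 - s = r + 1 by omega, List.take_succ_cons]
      rw [hr, take_takeWhile]
    have hdrop2 : l.drop (pvFindEnd l s + 1) = (l.drop (s + 1)).dropWhile pvCont := by
      rw [he, show s + r + 1 = (s + 1) + r by omega, ← List.drop_drop, hr, drop_takeWhile]
    rw [pvOuterA_eq l (pvFindEnd l s + 1), hslice, hdrop2]
    rw [hd]
    show _ = count + ((pvTok (l[s] :: l.drop (s + 1))).map pvDelta).sum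
    rw [pvTok]
    simp only [List.map_cons, List.sum_cons, pvDelta]
    split_ifs <;> ring
  case isFalse h =>
    rw [List.drop_eq_nil_of_le (by omega)]
    simp [pvTok]
termination_by l.length - s
decreasing_by have := le_pvFindEnd l s; omega

theorem foldl_pvPush (l : List Char) (ts : List (List Char)) (t : List Char) :
    l.foldl pvPush (ts ++ [t])
      = ts ++ (t ++ l.takeWhile pvCont) :: pvTok (l.dropWhile pvCont) := by
  induction l generalizing ts t with
  | nil => simp [pvTok]
  | cons c cs ih =>
    by_cases hc : pvCont c
    · have hp : pvPush (ts ++ [t]) c = ts ++ [t ++ [c]] := by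
        simp [pvPush, hc]
      rw [List.foldl_cons, hp, ih, List.takeWhile_cons, if_pos hc, List.dropWhile_cons,
        if_pos hc]
      simp
    · have hp : pvPush (ts ++ [t]) c = (ts ++ [t]) ++ [[c]] := by
        simp [pvPush, hc]
      rw [List.foldl_cons, hp, ih, List.takeWhile_cons, if_neg hc, List.dropWhile_cons,
        if_neg hc, pvTok]
      simp
theorem foldl_pvPush_nil (l : List Char) : l.foldl pvPush [] = pvTok l := by
  cases l with
  | nil => simp [pvTok]
  | cons c cs =>
    have hp : pvPush [] c = [] ++ [[c]] := by simp [pvPush]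
    rw [List.foldl_cons, hp, foldl_pvPush, pvTok]
    simp

theorem dsum_eq (ts : List (List Char)) :
    ((ts.map pvDelta).sum : Int)
      = (ts.length : Int) - ts.count "Rn".toList - ts.count "Ar".toList
          - 2 * ts.count "Y".toList := by
  induction ts with
  | nil => simp
  | cons t ts ih =>
    simp only [List.map_cons, List.sum_cons, List.length_cons, List.count_cons, pvDelta]
    split_ifs with h1 h2 h3 <;>
      simp_all <;> omega

-- ===== VERDICT (by name: the statement is the Claim_ definition above) =====
theorem step_count_spec : Claim_equal_step_count := by
  intro m _
  unfold Spec_step_count step_count step_count_alt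
  rw [pvOuterA_eq, foldl_pvPush_nil, List.drop_zero, dsum_eq]
  ring
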